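-- pv_equiv track=rewrite | github.com/yasufumi-nakata/Pytra | src/pytra/compiler/east_parts/core.py | _sh_strip_inline_comment
-- ===== SOURCE A (Python) =====
-- def _sh_strip_inline_comment(text: str) -> str:
--     """文字列リテラル外の末尾コメントを除去する。"""
--     in_str: str | None = None
--     esc = False
--     for i, ch in enumerate(text):
--         if in_str is not None:
--             if esc:
--                 esc = False
--             elif ch == "\\":
--                 esc = True
--             elif ch == in_str:
--                 in_str = None
--             continue
--         if ch in {"'", '"'}:
--             in_str = ch
--             continue
--         if ch == "#":
--             return text[:i].rstrip()
--     return text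
-- ===== SOURCE B (Python) =====
-- def _sh_strip_inline_comment(text: str) -> str:
--     """Strip a trailing '#' comment outside string literals (index walk that
--     skips whole quoted literals in an inner loop, instead of A's flat
--     in_str/esc state machine)."""
--     i, n = 0, len(text)
--     while i < n:
--         ch = text[i]
--         if ch == "#":
--             return text[:i].rstrip()
--         if ch in ("'", '"'):
--             j = i + 1
--             while j < n:
--                 cj = text[j]
--                 if cj == "\\":
--                     j += 2
--                 elif cj == ch:
--                     j += 1
--                     break
--                 else:
--                     j += 1
--             i = j
--         else:
--             i += 1
--     return text
-- ===== Notes on version B (the rewrite author's own statement) =====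
-- stated objective: alternative
-- what changed: Replaced the single-pass in_str/esc boolean state machine with an index walk whose inner loop consumes each whole quoted literal (stepping 2 over escapes), so no cross-iteration string/escape state is carried.
import Mathlib
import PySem

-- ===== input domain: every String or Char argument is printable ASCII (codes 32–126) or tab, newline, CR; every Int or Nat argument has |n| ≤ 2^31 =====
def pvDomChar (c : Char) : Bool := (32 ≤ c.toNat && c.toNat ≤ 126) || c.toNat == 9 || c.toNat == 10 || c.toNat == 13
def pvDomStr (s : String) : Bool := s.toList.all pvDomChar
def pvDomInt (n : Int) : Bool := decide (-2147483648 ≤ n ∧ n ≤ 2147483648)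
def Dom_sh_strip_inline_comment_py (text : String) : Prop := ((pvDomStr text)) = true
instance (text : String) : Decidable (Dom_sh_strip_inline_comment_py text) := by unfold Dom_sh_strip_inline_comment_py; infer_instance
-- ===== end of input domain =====

-- B replaces A's flat in_str/esc state machine by an index walk with an inner
-- loop that consumes each whole quoted literal; same O(n), alternative structure.

-- ===== PORT A =====
-- literal port of A's for-loop: state = (in_str : Option Char, esc : Bool), index i
def shAGo (text : String) : List Char → Nat → Option Char → Bool → String
  | [], _, _, _ => text
  | ch :: rest, i, some q, esc =>
      if esc then shAGo text rest (i+1) (some q) false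
      else if ch == '\\' then shAGo text rest (i+1) (some q) true
      else if ch == q then shAGo text rest (i+1) none false
      else shAGo text rest (i+1) (some q) false
  | ch :: rest, i, none, _ =>
      if ch == '\'' || ch == '"' then shAGo text rest (i+1) (some ch) false
      else if ch == '#' then PySem.Str.rstrip (PySem.Str.slice text none (some (i : Int)))
      else shAGo text rest (i+1) none false

def sh_strip_inline_comment_py (text : String) : String :=
  shAGo text text.toList 0 none false

-- ===== PORT B =====
-- inner while-loop of B: consume a quoted literal opened by q; returns the
-- remaining suffix together with the updated index j
def shBSkip (q : Char) : List Char → Nat → List Char × Nat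
  | [], j => ([], j)
  | cj :: rest, j =>
      if cj == '\\' then shBSkip q rest.tail (j + 2)   -- j += 2: skip the escaped char
      else if cj == q then (rest, j + 1)
      else shBSkip q rest (j + 1)
  termination_by l _ => l.length
  decreasing_by
  · simp only [List.length_tail, List.length_cons]; omega
  · simp

theorem shBSkip_len (q : Char) : ∀ (l : List Char) (j : Nat), (shBSkip q l j).1.length ≤ l.length
  | [], j => by simp [shBSkip]
  | cj :: rest, j => by
    rw [shBSkip]
    split
    · exact le_trans (shBSkip_len q rest.tail (j+2))
        (by simp only [List.length_tail, List.length_cons]; omega)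
    · split
      · simp
      · exact le_trans (shBSkip_len q rest (j+1)) (by simp)
  termination_by l _ => l.length
  decreasing_by
  · simp only [List.length_tail, List.length_cons]; omega
  · simp

-- outer while-loop of B
def shBGo (text : String) : List Char → Nat → String
  | [], _ => text
  | ch :: rest, i =>
      if ch == '#' then PySem.Str.rstrip (PySem.Str.slice text none (some (i : Int)))
      else if ch == '\'' || ch == '"' then
        shBGo text (shBSkip ch rest (i+1)).1 (shBSkip ch rest (i+1)).2
      else shBGo text rest (i+1)
  termination_by l _ => l.length
  decreasing_by
  · exact Nat.lt_succ_of_le (shBSkip_len ch rest (i+1))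
  · simp

def sh_strip_inline_comment_py_alt (text : String) : String :=
  shBGo text text.toList 0

-- ===== PRECONDITION & SPEC =====
def Spec_sh_strip_inline_comment_py (text : String) (out : String) : Prop := out = sh_strip_inline_comment_py_alt text
instance (text : String) (out : String) : Decidable (Spec_sh_strip_inline_comment_py text out) := by unfold Spec_sh_strip_inline_comment_py; infer_instance

-- ===== CLAIM (what is proved, stated in full; the proofs are below) =====
def Claim_equal_sh_strip_inline_comment_py : Prop := ∀ (text : String), Dom_sh_strip_inline_comment_py text → Spec_sh_strip_inline_comment_py text (sh_strip_inline_comment_py text)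

-- ===== LEMMAS AND PROOFS =====

-- combined invariant, strong induction on the length of the remaining list:
-- (a) outside a string, A's scan equals B's outer loop;
-- (b) inside a string (esc = false), A's scan equals B's outer loop resumed
--     after B's inner skip.
theorem sh_main_aux (text : String) : ∀ (n : Nat) (l : List Char), l.length ≤ n →
    (∀ i, shAGo text l i none false = shBGo text l i) ∧
    (∀ i q, shAGo text l i (some q) false =
      shBGo text (shBSkip q l i).1 (shBSkip q l i).2) := by
  intro n
  induction n with
  | zero =>
    intro l hl
    have : l = [] := List.eq_nil_of_length_eq_zero (Nat.le_zero.mp hl)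
    subst this
    constructor
    · intro i; simp [shAGo, shBGo]
    · intro i q; simp [shAGo, shBSkip, shBGo]
  | succ n ih =>
    intro l hl
    match l with
    | [] =>
      constructor
      · intro i; simp [shAGo, shBGo]
      · intro i q; simp [shAGo, shBSkip, shBGo]
    | ch :: rest =>
      have hr : rest.length ≤ n := by simpa using Nat.lt_succ_iff.mp (Nat.lt_of_lt_of_le (by simp) hl)
      constructor
      · intro i
        by_cases hq : ch == '\'' || ch == '"'
        · have hnh : (ch == '#') = false := by
            rcases Bool.or_eq_true_iff.mp hq with h | h <;>
              · have := eq_of_beq h; subst this; decide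
          rw [shAGo, shBGo]
          simp only [hq, hnh, if_true, Bool.false_eq_true, if_false]
          exact (ih rest hr).2 (i+1) ch
        · rw [shAGo, shBGo]
          simp only [hq, Bool.false_eq_true, if_false]
          by_cases hh : ch == '#'
          · simp [hh]
          · simp only [hh, Bool.false_eq_true, if_false]
            exact (ih rest hr).1 (i+1)
      · intro i q
        rw [shAGo, shBSkip]
        simp only [Bool.false_eq_true, if_false]
        by_cases hb : ch == '\\'
        · simp only [hb, if_true]
          match rest with
          | [] => simp [shAGo, shBSkip, shBGo]
          | c' :: rest' =>
            have hr' : rest'.length ≤ n := by simp at hl ⊢; omega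
            rw [shAGo]
            simp only [if_true, List.tail_cons]
            exact (ih rest' hr').2 (i+2) q
        · simp only [hb, Bool.false_eq_true, if_false]
          by_cases he : ch == q
          · simp only [he, if_true]
            exact (ih rest hr).1 (i+1)
          · simp only [he, Bool.false_eq_true, if_false]
            exact (ih rest hr).2 (i+1) q

-- ===== VERDICT (by name: the statement is the Claim_ definition above) =====
theorem sh_strip_inline_comment_py_spec : Claim_equal_sh_strip_inline_comment_py := by
  intro text _
  unfold Spec_sh_strip_inline_comment_py sh_strip_inline_comment_py sh_strip_inline_comment_py_alt
  exact (sh_main_aux text text.toList.length text.toList (Nat.le_refl _)).1 0
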